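-- pv_equiv track=rewrite | github.com/Charmipsy/DAA-SLOT-D | perfectnum.py | min_max_sequence
-- ===== SOURCE A (Python) =====
-- def min_max_sequence(numbers):
--     if not numbers:
--         return []
--
--     sequences = []
--     current_sequence = [numbers[0]]
--
--     for num in numbers[1:]:
--         if num == current_sequence[-1] + 1:
--             current_sequence.append(num)
--         else:
--             sequences.append((min(current_sequence), max(current_sequence)))
--             current_sequence = [num]
--
--     sequences.append((min(current_sequence), max(current_sequence)))
--
--     return sequences
-- ===== SOURCE B (Python) =====
-- def min_max_sequence(numbers):
--     res = []
--     i, n = 0, len(numbers)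
--     while i < n:
--         j = i + 1
--         while j < n and numbers[j] == numbers[j - 1] + 1:
--             j += 1
--         seg = numbers[i:j]
--         res.append((min(seg), max(seg)))
--         i = j
--     return res
-- ===== Notes on version B (the rewrite author's own statement) =====
-- stated objective: alternative
-- what changed: A streams elements into a growing current-run list with an accumulator of finished runs; B scans with two indices, finding each run's end index first and then emitting (min, max) of that slice, keeping no run-in-progress state.
import Mathlib
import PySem

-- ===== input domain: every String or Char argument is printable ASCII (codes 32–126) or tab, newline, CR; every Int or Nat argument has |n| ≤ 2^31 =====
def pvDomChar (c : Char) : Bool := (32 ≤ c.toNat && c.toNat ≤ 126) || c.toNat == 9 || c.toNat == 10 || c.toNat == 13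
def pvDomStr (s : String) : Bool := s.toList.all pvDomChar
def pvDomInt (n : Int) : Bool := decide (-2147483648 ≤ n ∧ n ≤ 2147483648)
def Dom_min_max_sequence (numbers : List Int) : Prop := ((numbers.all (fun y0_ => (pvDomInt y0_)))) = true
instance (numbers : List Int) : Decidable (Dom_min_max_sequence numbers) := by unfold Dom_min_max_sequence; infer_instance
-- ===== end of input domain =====

-- B scans with two cursors (run-splitting) instead of A's streaming accumulator; alternative decomposition, same cost.

-- ===== PORT A =====
-- Python's min(xs)/max(xs) on a nonempty list (left-to-right scan); 0 is never used (callers pass nonempty lists)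
def pyMin (xs : List Int) : Int := match xs with | [] => 0 | h :: t => t.foldl min h
def pyMax (xs : List Int) : Int := match xs with | [] => 0 | h :: t => t.foldl max h

-- one step of A's for-loop over state (sequences, current_sequence); cs[-1] = getLastD (cs nonempty throughout)
def stepA (st : List (Int × Int) × List Int) (num : Int) : List (Int × Int) × List Int :=
  if num = st.2.getLastD 0 + 1 then (st.1, st.2 ++ [num])
  else (st.1 ++ [(pyMin st.2, pyMax st.2)], [num])

def min_max_sequence (numbers : List Int) : List (Int × Int) :=
  match numbers with
  | [] => []
  | h :: t =>
    let st := t.foldl stepA ([], [h])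
    st.1 ++ [(pyMin st.2, pyMax st.2)]

-- ===== PORT B =====
-- inner while-loop: advance the second cursor while the run continues; returns (run elements after the start, rest)
def takeRun (prev : Int) (xs : List Int) : List Int × List Int :=
  match xs with
  | [] => ([], [])
  | x :: xs' =>
    if x = prev + 1 then
      let p := takeRun x xs'
      (x :: p.1, p.2)
    else ([], x :: xs')

theorem takeRun_rest_le (prev : Int) (xs : List Int) : (takeRun prev xs).2.length ≤ xs.length := by
  induction xs generalizing prev with
  | nil => simp [takeRun]
  | cons x xs' ih =>
    simp only [takeRun]
    split
    · exact le_trans (ih x) (Nat.le_succ _)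
    · simp

-- outer while-loop: each iteration slices off one run and emits (min, max) of the segment
def min_max_sequence_alt (numbers : List Int) : List (Int × Int) :=
  match numbers with
  | [] => []
  | h :: t =>
    let p := takeRun h t
    let seg := h :: p.1
    (pyMin seg, pyMax seg) :: min_max_sequence_alt p.2
termination_by numbers.length
decreasing_by
  simpa using Nat.lt_succ_of_le (takeRun_rest_le h t)

-- ===== PRECONDITION & SPEC =====
def Spec_min_max_sequence (numbers : List Int) (out : List (Int × Int)) : Prop := out = min_max_sequence_alt numbers
instance (numbers : List Int) (out : List (Int × Int)) : Decidable (Spec_min_max_sequence numbers out) := by unfold Spec_min_max_sequence; infer_instance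

-- ===== CLAIM (what is proved, stated in full; the proofs are below) =====
def Claim_equal_min_max_sequence : Prop := ∀ (numbers : List Int), Dom_min_max_sequence numbers → Spec_min_max_sequence numbers (min_max_sequence numbers)

-- ===== LEMMAS AND PROOFS =====

-- A's loop, reformulated as straight recursion on the remaining input with the current run as state
def goA (cs : List Int) (t : List Int) : List (Int × Int) :=
  match t with
  | [] => [(pyMin cs, pyMax cs)]
  | x :: xs =>
    if x = cs.getLastD 0 + 1 then goA (cs ++ [x]) xs
    else (pyMin cs, pyMax cs) :: goA [x] xs

theorem foldA_eq_goA (t : List Int) (seqs : List (Int × Int)) (cs : List Int) :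
    (t.foldl stepA (seqs, cs)).1 ++ [(pyMin (t.foldl stepA (seqs, cs)).2, pyMax (t.foldl stepA (seqs, cs)).2)]
      = seqs ++ goA cs t := by
  induction t generalizing seqs cs with
  | nil => simp [goA]
  | cons x xs ih =>
    simp only [List.foldl_cons, goA, stepA]
    split_ifs with hx
    · exact ih seqs (cs ++ [x])
    · rw [ih (seqs ++ [(pyMin cs, pyMax cs)]) [x], List.append_assoc, List.singleton_append]

theorem getLastD_concat' (cs : List Int) (x : Int) : (cs ++ [x]).getLastD 0 = x := by
  simp

theorem goA_eq_alt (t : List Int) (cs : List Int) (hcs : cs ≠ []) :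
    goA cs t = (pyMin (cs ++ (takeRun (cs.getLastD 0) t).1), pyMax (cs ++ (takeRun (cs.getLastD 0) t).1))
        :: min_max_sequence_alt (takeRun (cs.getLastD 0) t).2 := by
  induction t generalizing cs with
  | nil => simp [goA, takeRun, min_max_sequence_alt]
  | cons x xs ih =>
    simp only [goA, takeRun]
    split_ifs with hx
    · have h2 := ih (cs ++ [x]) (by simp)
      rw [getLastD_concat'] at h2
      rw [h2]
      simp
    · rw [ih [x] (by simp)]
      conv_rhs => rw [min_max_sequence_alt]
      simp

-- ===== VERDICT (by name: the statement is the Claim_ definition above) =====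
theorem min_max_sequence_spec : Claim_equal_min_max_sequence := by
  intro numbers _
  unfold Spec_min_max_sequence
  match numbers with
  | [] => rw [min_max_sequence_alt]; rfl
  | h :: t =>
    show (t.foldl stepA ([], [h])).1 ++ [(pyMin (t.foldl stepA ([], [h])).2, pyMax (t.foldl stepA ([], [h])).2)] = _
    rw [foldA_eq_goA, List.nil_append, goA_eq_alt _ _ (by simp)]
    conv_rhs => rw [min_max_sequence_alt]
    simp
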